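-- pv_equiv track=rewrite | github.com/Zachanardo/Intellicrack | intellicrack/ui/enhanced_ui_integration.py | _compute_cfg_layout
-- ===== SOURCE A (Python) =====
-- _CFG_MIN_FOR_SECOND = 2
--
-- _CFG_MIN_FOR_BRANCH = 3
--
-- _CFG_MIN_FOR_SPLIT = 4
--
-- _CFG_MIN_FOR_EXIT = 5
--
-- def _compute_cfg_layout(count: int) -> list[tuple[int, int]]:
--     if count <= 0:
--         return []
--     if count == 1:
--         return [(200, 150)]
--     positions: list[tuple[int, int]] = [(200, 30)]
--     if count >= _CFG_MIN_FOR_SECOND: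
--         positions.append((200, 100))
--     if count >= _CFG_MIN_FOR_SPLIT:
--         positions.extend([(120, 180), (280, 180)])
--     elif count == _CFG_MIN_FOR_BRANCH:
--         positions.append((200, 180))
--     if count >= _CFG_MIN_FOR_EXIT:
--         positions.append((200, 260))
--     for i in range(_CFG_MIN_FOR_EXIT, count):
--         positions.append((100 + (i - 5) * 100, 340))
--     return positions[:count]
-- ===== SOURCE B (Python) =====
-- def _compute_cfg_layout(count: int) -> list[tuple[int, int]]:
--     def slot(i: int) -> tuple[int, int]:
--         if i == 0:
--             return (200, 150) if count == 1 else (200, 30)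
--         if i == 1:
--             return (200, 100)
--         if i == 2:
--             return (200, 180) if count == 3 else (120, 180)
--         if i == 3:
--             return (280, 180)
--         if i == 4:
--             return (200, 260)
--         return (100 + (i - 5) * 100, 340)
--     return [slot(i) for i in range(count)]
-- ===== Notes on version B (the rewrite author's own statement) =====
-- stated objective: simpler
-- what changed: Replaces A's cascading count-threshold branches that build and extend a mutable list then slice it with a single per-index mapping: slot i's position is computed directly from (i, count) and collected over range(count), no extend/append cascade and no final [:count] slice.
import Mathlib
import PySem

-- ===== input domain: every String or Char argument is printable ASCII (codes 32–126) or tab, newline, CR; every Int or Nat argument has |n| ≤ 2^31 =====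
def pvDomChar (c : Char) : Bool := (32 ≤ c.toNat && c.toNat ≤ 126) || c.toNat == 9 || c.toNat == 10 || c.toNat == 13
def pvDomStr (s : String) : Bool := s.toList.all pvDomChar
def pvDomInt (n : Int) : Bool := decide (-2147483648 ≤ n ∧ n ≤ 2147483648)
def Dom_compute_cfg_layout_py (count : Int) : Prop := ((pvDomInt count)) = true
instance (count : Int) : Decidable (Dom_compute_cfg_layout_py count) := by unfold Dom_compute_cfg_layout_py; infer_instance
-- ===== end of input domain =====

-- B replaces A's cascading threshold branches (append/extend then [:count] slice) with a
-- single per-index slot → position mapping over range(count); objective: simpler.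

-- ===== PORT A =====
def compute_cfg_layout_py (count : Int) : List (Int × Int) :=
  if count ≤ 0 then []
  else if count = 1 then [(200, 150)]
  else
    let positions : List (Int × Int) := [(200, 30)]
    let positions := if count ≥ 2 then positions ++ [(200, 100)] else positions
    let positions :=
      if count ≥ 4 then positions ++ [(120, 180), (280, 180)]
      else if count = 3 then positions ++ [(200, 180)]
      else positions
    let positions := if count ≥ 5 then positions ++ [(200, 260)] else positions
    let positions := (PySem.List.pyRange 5 count 1).foldl
      (fun acc i => acc ++ [(100 + (i - 5) * 100, 340)]) positions
    PySem.List.slice positions none (some count)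

-- ===== PORT B =====
def cfgSlot (count i : Int) : Int × Int :=
  if i = 0 then (if count = 1 then (200, 150) else (200, 30))
  else if i = 1 then (200, 100)
  else if i = 2 then (if count = 3 then (200, 180) else (120, 180))
  else if i = 3 then (280, 180)
  else if i = 4 then (200, 260)
  else (100 + (i - 5) * 100, 340)

def compute_cfg_layout_py_alt (count : Int) : List (Int × Int) :=
  (PySem.List.pyRange 0 count 1).map (cfgSlot count)

-- ===== PRECONDITION & SPEC =====
def Spec_compute_cfg_layout_py (count : Int) (out : List (Int × Int)) : Prop := out = compute_cfg_layout_py_alt count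
instance (count : Int) (out : List (Int × Int)) : Decidable (Spec_compute_cfg_layout_py count out) := by unfold Spec_compute_cfg_layout_py; infer_instance

-- ===== CLAIM (what is proved, stated in full; the proofs are below) =====
def Claim_equal_compute_cfg_layout_py : Prop := ∀ (count : Int), Dom_compute_cfg_layout_py count → Spec_compute_cfg_layout_py count (compute_cfg_layout_py count)

-- ===== LEMMAS AND PROOFS =====

-- Both sides for count ≥ 5: the fixed five-slot prefix followed by the overflow row.
lemma compute_cfg_layout_big (count : Int) (h : 5 ≤ count) :
    compute_cfg_layout_py count =
      [(200, 30), (200, 100), (120, 180), (280, 180), (200, 260)] ++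
        (PySem.List.pyRange 5 count 1).map (fun i => (100 + (i - 5) * 100, 340)) := by
  unfold compute_cfg_layout_py
  simp only [if_neg (show ¬ count ≤ 0 by omega), if_neg (show ¬ count = 1 by omega),
    if_pos (show count ≥ 2 by omega), if_pos (show count ≥ 4 by omega),
    if_pos (show count ≥ 5 by omega), PySem.List.foldl_append_singleton_eq_map]
  rw [PySem.List.slice_to _ (show (0:Int) ≤ count by omega)]
  rw [List.take_of_length_le (by simp [PySem.List.length_pyRange_one]; omega)]
  simp

lemma compute_cfg_layout_alt_big (count : Int) (h : 5 ≤ count) :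
    compute_cfg_layout_py_alt count =
      [(200, 30), (200, 100), (120, 180), (280, 180), (200, 260)] ++
        (PySem.List.pyRange 5 count 1).map (fun i => (100 + (i - 5) * 100, 340)) := by
  unfold compute_cfg_layout_py_alt
  rw [PySem.List.pyRange_one_append 0 5 count (by omega) h, List.map_append]
  congr 1
  · norm_num [PySem.List.pyRange_one_cons, PySem.List.pyRange_one_eq_nil, cfgSlot]
    omega
  · refine List.map_congr_left (fun i hi => ?_)
    rw [PySem.List.mem_pyRange_one] at hi
    simp only [cfgSlot, if_neg (by omega : ¬ i = 0), if_neg (by omega : ¬ i = 1),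
      if_neg (by omega : ¬ i = 2), if_neg (by omega : ¬ i = 3), if_neg (by omega : ¬ i = 4)]

-- ===== VERDICT (by name: the statement is the Claim_ definition above) =====
theorem compute_cfg_layout_py_spec : Claim_equal_compute_cfg_layout_py := by
  intro count _
  unfold Spec_compute_cfg_layout_py
  by_cases h0 : count ≤ 0
  · rw [compute_cfg_layout_py, if_pos h0, compute_cfg_layout_py_alt,
      PySem.List.pyRange_one_eq_nil h0, List.map_nil]
  rcases lt_or_ge count 5 with hlt | hge
  · interval_cases count <;> decide
  · rw [compute_cfg_layout_big count hge, compute_cfg_layout_alt_big count hge]
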